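-- pv_equiv track=rewrite | github.com/kabutohui/Tencent2019 | Tencent2019/Task05.py | numofBlock
-- ===== SOURCE A (Python) =====
-- def numofBlock(q):
--     w, b = 0, 0
--     areacount = (q[2] - q[0] + 1) * (q[3] - q[1] + 1)
--     if (q[2] - q[0] + 1) % 2 == 0 or (q[3] - q[1] + 1) % 2 == 0: # 如果纵横方向上有偶数，黑白块数一样
--         w = int(areacount / 2)
--         b = areacount - w
--     else:
--         # 横纵坐标都为奇数或者偶数的块为白色
--         w = len([x for x in range(q[0], q[2]+1) if x % 2 == 0]) * len([x for x in range(q[1], q[3]+1) if x % 2 == 0]) + \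
--             len([x for x in range(q[0], q[2] + 1) if x % 2 != 0]) * len([x for x in range(q[1], q[3] + 1) if x % 2 != 0])
--         b = areacount - w
--
--     return w, b
-- ===== SOURCE B (Python) =====
-- def _counts(a, b):
--     # (number of evens, number of odds) in the integer interval [a, b]
--     if b < a:
--         return 0, 0
--     e = b // 2 - (a - 1) // 2
--     return e, (b - a + 1) - e
--
-- def numofBlock(q):
--     x1, y1, x2, y2 = q[0], q[1], q[2], q[3]
--     dx = x2 - x1 + 1
--     dy = y2 - y1 + 1
--     area = dx * dy
--     if dx % 2 == 0 or dy % 2 == 0: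
--         w = area // 2
--     else:
--         ex, ox = _counts(x1, x2)
--         ey, oy = _counts(y1, y2)
--         w = ex * ey + ox * oy
--     return w, area - w
-- ===== Notes on version B (the rewrite author's own statement) =====
-- stated objective: alternative
-- what changed: B replaces A's per-cell range scans (materialising every x and y coordinate and filtering for parity) with closed-form counts of even/odd integers in each coordinate interval, and replaces A's float-based int(area/2) with exact integer area//2.
-- intended difference: On rectangles handled by the even-dimension branch whose half-area has magnitude at least 2^53 and does not fit a 53-bit float mantissa, A's int(areacount/2) returns the float-rounded half (off by up to hundreds, with b = areacount - w shifted accordingly), while B returns the exact areacount//2 split, which is the intended count. — e.g. on numofBlock([-2147483648, -2147483648, 2147483645, 2147483648]): A returns [9223372034707292160, 9223372034707292158], B returns [9223372034707292159, 9223372034707292159]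
import Mathlib
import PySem

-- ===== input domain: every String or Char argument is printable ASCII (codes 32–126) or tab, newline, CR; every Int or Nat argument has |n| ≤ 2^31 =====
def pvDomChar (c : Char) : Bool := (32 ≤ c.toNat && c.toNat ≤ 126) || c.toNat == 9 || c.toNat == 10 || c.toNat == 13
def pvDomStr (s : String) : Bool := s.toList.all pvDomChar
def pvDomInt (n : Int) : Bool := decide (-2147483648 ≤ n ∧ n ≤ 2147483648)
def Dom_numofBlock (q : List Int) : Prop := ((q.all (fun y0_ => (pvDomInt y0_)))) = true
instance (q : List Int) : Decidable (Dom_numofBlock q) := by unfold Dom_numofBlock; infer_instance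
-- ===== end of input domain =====

-- B replaces A's per-coordinate range scans by closed-form even/odd counts and A's
-- float-based int(area/2) by exact integer halving (that float-rounding region is stated as D_).
-- ===== PORT A =====
-- Exact model of Python's `int(n / 2)` on an int n: true division yields the IEEE-754 double
-- nearest to n/2 (round half to even), int() truncates toward zero; exact for |n| < 2^1024.
def pyIntHalfFloat (n : Int) : Int :=
  let a := n.natAbs
  let res : Nat :=
    if a < 2 ^ 53 then a / 2
    else
      let s := Nat.log2 a - 53
      let d := 2 ^ (s + 1)
      let q1 := a / d
      let r := a % d
      let q2 := if 2 ^ s < r ∨ (r = 2 ^ s ∧ q1 % 2 = 1) then q1 + 1 else q1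
      q2 * 2 ^ s
  if n < 0 then -(res : Int) else (res : Int)

def numofBlock (q : List Int) : List Int :=
  let q0 := (PySem.List.pyGet? q 0).getD 0   -- Pre_ guarantees all four indexings succeed
  let q1 := (PySem.List.pyGet? q 1).getD 0
  let q2 := (PySem.List.pyGet? q 2).getD 0
  let q3 := (PySem.List.pyGet? q 3).getD 0
  let areacount := (q2 - q0 + 1) * (q3 - q1 + 1)
  if PySem.Int.mod (q2 - q0 + 1) 2 = 0 ∨ PySem.Int.mod (q3 - q1 + 1) 2 = 0 then
    let w := pyIntHalfFloat areacount
    [w, areacount - w]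
  else
    let w := (((PySem.List.pyRange q0 (q2 + 1) 1).filter (fun x => PySem.Int.mod x 2 == 0)).length : Int)
           * (((PySem.List.pyRange q1 (q3 + 1) 1).filter (fun x => PySem.Int.mod x 2 == 0)).length : Int)
           + (((PySem.List.pyRange q0 (q2 + 1) 1).filter (fun x => PySem.Int.mod x 2 != 0)).length : Int)
           * (((PySem.List.pyRange q1 (q3 + 1) 1).filter (fun x => PySem.Int.mod x 2 != 0)).length : Int)
    [w, areacount - w]

-- ===== PORT B =====
-- (number of evens, number of odds) in the integer interval [a, b]
def pvCounts (a b : Int) : Int × Int :=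
  if b < a then (0, 0)
  else
    let e := PySem.Int.floordiv b 2 - PySem.Int.floordiv (a - 1) 2
    (e, (b - a + 1) - e)

def numofBlock_alt (q : List Int) : List Int :=
  let x1 := (PySem.List.pyGet? q 0).getD 0
  let y1 := (PySem.List.pyGet? q 1).getD 0
  let x2 := (PySem.List.pyGet? q 2).getD 0
  let y2 := (PySem.List.pyGet? q 3).getD 0
  let dx := x2 - x1 + 1
  let dy := y2 - y1 + 1
  let area := dx * dy
  let w :=
    if PySem.Int.mod dx 2 = 0 ∨ PySem.Int.mod dy 2 = 0 then
      PySem.Int.floordiv area 2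
    else
      (pvCounts x1 x2).1 * (pvCounts y1 y2).1 + (pvCounts x1 x2).2 * (pvCounts y1 y2).2
  [w, area - w]

-- ===== PRECONDITION & SPEC =====
-- Pre_ excludes only lists with fewer than 4 elements, on which A raises IndexError.
def Pre_numofBlock (q : List Int) : Prop := 4 ≤ q.length
instance (q : List Int) : Decidable (Pre_numofBlock q) := by unfold Pre_numofBlock; infer_instance
def pvWitness_numofBlock : List Int := [1, 1, 4, 5]

-- On rectangles taken through the even-dimension branch whose half-area has magnitude ≥ 2^53
-- and does not fit a 53-bit float mantissa, A's int(areacount/2) returns the float-rounded half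
-- (and b shifted accordingly), while B returns the exact areacount//2 split, the intended count.
def D_numofBlock (q : List Int) : Prop :=
  let a := (q.getD 2 0 - q.getD 0 0 + 1) * (q.getD 3 0 - q.getD 1 0 + 1)
  4 ≤ q.length ∧ 2 ∣ a ∧ 2 ^ 53 ≤ (a / 2).natAbs ∧
    ¬ 2 ^ (Nat.log2 (a / 2).natAbs - 52) ∣ (a / 2).natAbs
instance (q : List Int) : Decidable (D_numofBlock q) := by unfold D_numofBlock; infer_instance

def Spec_numofBlock (q : List Int) (out : List Int) : Prop := ¬ D_numofBlock q → out = numofBlock_alt q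
instance (q : List Int) (out : List Int) : Decidable (Spec_numofBlock q out) := by unfold Spec_numofBlock; infer_instance

def pvDiffWitness_numofBlock : List Int := [-2147483648, -2147483648, 2147483645, 2147483648]
def pvDiffWitnessOut_numofBlock : (List Int) × (List Int) :=
  ([9223372034707292160, 9223372034707292158], [9223372034707292159, 9223372034707292159])

-- ===== CLAIM (what is proved, stated in full; the proofs are below) =====
def Claim_unchanged_numofBlock : Prop := ∀ (q : List Int), Dom_numofBlock q → Pre_numofBlock q → Spec_numofBlock q (numofBlock q)
def Claim_changed_numofBlock : Prop := Dom_numofBlock (pvDiffWitness_numofBlock) ∧ Pre_numofBlock (pvDiffWitness_numofBlock) ∧ D_numofBlock (pvDiffWitness_numofBlock) ∧ numofBlock (pvDiffWitness_numofBlock) = pvDiffWitnessOut_numofBlock.1 ∧ numofBlock_alt (pvDiffWitness_numofBlock) = pvDiffWitnessOut_numofBlock.2 ∧ pvDiffWitnessOut_numofBlock.1 ≠ pvDiffWitnessOut_numofBlock.2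
def Claim_exact_numofBlock : Prop := ∀ (q : List Int), Dom_numofBlock q → Pre_numofBlock q → D_numofBlock q → numofBlock q ≠ numofBlock_alt q

-- ===== LEMMAS AND PROOFS =====

theorem pvLog2_double (m : Nat) (hm : m ≠ 0) : Nat.log2 (2 * m) = Nat.log2 m + 1 := by
  simp only [Nat.log2_eq_log_two]
  rw [mul_comm, Nat.log_mul_base (by norm_num) hm]

theorem pvRound_exact (a s : Nat) (hd : 2 ^ (s + 1) ∣ a) :
    (if 2 ^ s < a % 2 ^ (s + 1) ∨ (a % 2 ^ (s + 1) = 2 ^ s ∧ (a / 2 ^ (s + 1)) % 2 = 1)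
      then a / 2 ^ (s + 1) + 1 else a / 2 ^ (s + 1)) * 2 ^ s = a / 2 := by
  have hr : a % 2 ^ (s + 1) = 0 := Nat.mod_eq_zero_of_dvd hd
  rw [hr]
  have hcond : ¬ ((2:Nat) ^ s < 0 ∨ ((0:Nat) = 2 ^ s ∧ (a / 2 ^ (s + 1)) % 2 = 1)) := by
    have : (0:Nat) < 2 ^ s := by positivity
    omega
  rw [if_neg hcond]
  obtain ⟨k, hk⟩ := hd
  subst hk
  rw [Nat.mul_div_cancel_left _ (by positivity)]
  have h1 : 2 ^ (s + 1) * k = 2 * (2 ^ s * k) := by ring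
  rw [h1, Nat.mul_div_cancel_left _ (by norm_num)]
  ring

theorem pvHalfFloat_eq (n : Int) (heven : n % 2 = 0)
    (hok : (n / 2).natAbs < 2 ^ 53 ∨ 2 ^ (Nat.log2 (n / 2).natAbs - 52) ∣ (n / 2).natAbs) :
    pyIntHalfFloat n = n / 2 := by
  have hn2 : n = 2 * (n / 2) := by omega
  have hm : n.natAbs = 2 * (n / 2).natAbs := by
    conv_lhs => rw [hn2]
    rw [Int.natAbs_mul]
    rfl
  unfold pyIntHalfFloat
  by_cases hlt : n.natAbs < 2 ^ 53
  · simp only [if_pos hlt]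
    omega
  · simp only [if_neg hlt]
    have hmne : (n / 2).natAbs ≠ 0 := by omega
    have hL : Nat.log2 n.natAbs = Nat.log2 (n / 2).natAbs + 1 := by
      rw [hm]; exact pvLog2_double _ hmne
    have hd : 2 ^ (Nat.log2 n.natAbs - 53 + 1) ∣ n.natAbs := by
      rcases hok with h1 | h2
      · have hge : 2 ^ 52 ≤ (n / 2).natAbs := by omega
        have hlo := Nat.log2_self_le hmne
        have hhi := Nat.lt_log2_self (n := (n / 2).natAbs)
        have hlog : Nat.log2 (n / 2).natAbs = 52 := by
          have h1' : Nat.log2 (n / 2).natAbs < 53 := by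
            by_contra hc
            push_neg at hc
            have : (2:Nat) ^ 53 ≤ 2 ^ Nat.log2 (n / 2).natAbs :=
              Nat.pow_le_pow_right (by norm_num) hc
            omega
          have h2' : 52 < Nat.log2 (n / 2).natAbs + 1 := by
            by_contra hc
            push_neg at hc
            have : (2:Nat) ^ (Nat.log2 (n / 2).natAbs + 1) ≤ 2 ^ 52 :=
              Nat.pow_le_pow_right (by norm_num) (by omega)
            omega
          omega
        rw [hL, hlog]
        norm_num
        omega
      · obtain ⟨k, hk⟩ := h2
        have hE : (2:Nat) ^ (Nat.log2 n.natAbs - 53 + 1) = 2 * 2 ^ (Nat.log2 (n / 2).natAbs - 52) := by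
          rw [hL]
          have h3 : Nat.log2 (n / 2).natAbs + 1 - 53 + 1 = Nat.log2 (n / 2).natAbs - 52 + 1 := by omega
          rw [h3, pow_succ]
          ring
        refine ⟨k, ?_⟩
        rw [hE]
        conv_lhs => rw [hm, hk]
        ring
    rw [pvRound_exact _ _ hd]
    omega

theorem pvRound_ne (a s m : Nat) (hnd : ¬ 2 ^ s ∣ m) :
    (if 2 ^ s < a % 2 ^ (s + 1) ∨ (a % 2 ^ (s + 1) = 2 ^ s ∧ (a / 2 ^ (s + 1)) % 2 = 1)
      then a / 2 ^ (s + 1) + 1 else a / 2 ^ (s + 1)) * 2 ^ s ≠ m := by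
  intro h
  exact hnd (h ▸ dvd_mul_left _ _)

theorem pvHalfFloat_ne (n : Int) (heven : n % 2 = 0)
    (hbig : 2 ^ 53 ≤ (n / 2).natAbs)
    (hnd : ¬ 2 ^ (Nat.log2 (n / 2).natAbs - 52) ∣ (n / 2).natAbs) :
    pyIntHalfFloat n ≠ n / 2 := by
  have hn2 : n = 2 * (n / 2) := by omega
  have hm : n.natAbs = 2 * (n / 2).natAbs := by
    conv_lhs => rw [hn2]
    rw [Int.natAbs_mul]
    rfl
  have hlt : ¬ n.natAbs < 2 ^ 53 := by omega
  have hmne : (n / 2).natAbs ≠ 0 := by omega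
  have hL : Nat.log2 n.natAbs = Nat.log2 (n / 2).natAbs + 1 := by
    rw [hm]; exact pvLog2_double _ hmne
  have hlog : 53 ≤ Nat.log2 (n / 2).natAbs := by
    by_contra hc
    push_neg at hc
    have h1 := Nat.lt_log2_self (n := (n / 2).natAbs)
    have h2 : (2:Nat) ^ (Nat.log2 (n / 2).natAbs + 1) ≤ 2 ^ 53 :=
      Nat.pow_le_pow_right (by norm_num) (by omega)
    omega
  have hs : Nat.log2 n.natAbs - 53 = Nat.log2 (n / 2).natAbs - 52 := by omega
  have hnd' : ¬ 2 ^ (Nat.log2 n.natAbs - 53) ∣ (n / 2).natAbs := by rw [hs]; exact hnd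
  have hne := pvRound_ne n.natAbs (Nat.log2 n.natAbs - 53) (n / 2).natAbs hnd'
  unfold pyIntHalfFloat
  simp only [if_neg hlt]
  intro hEq
  exact hne (by omega)

theorem pvEvenCount (c a : Int) :
    ((((PySem.List.pyRange a c 1).filter (fun x => PySem.Int.mod x 2 == 0)).length : Int))
      = if c ≤ a then 0 else PySem.Int.floordiv (c - 1) 2 - PySem.Int.floordiv (a - 1) 2 := by
  obtain ⟨n, hn⟩ : ∃ n : Nat, (c - a).toNat = n := ⟨_, rfl⟩
  induction n generalizing a with
  | zero =>
    have hca : c ≤ a := by omega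
    rw [PySem.List.pyRange_one_eq_nil hca]
    simp [hca]
  | succ n ih =>
    have hac : a < c := by omega
    rw [PySem.List.pyRange_one_cons hac, List.filter_cons]
    have h2 : PySem.Int.mod a 2 = a % 2 :=
      PySem.Int.mod_eq_emod_of_pos (by norm_num)
    have hfa : PySem.Int.floordiv (a - 1) 2 = (a - 1) / 2 :=
      PySem.Int.floordiv_eq_ediv_of_pos (by norm_num)
    have hfa' : PySem.Int.floordiv (a + 1 - 1) 2 = (a + 1 - 1) / 2 :=
      PySem.Int.floordiv_eq_ediv_of_pos (by norm_num)
    have hfc : PySem.Int.floordiv (c - 1) 2 = (c - 1) / 2 :=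
      PySem.Int.floordiv_eq_ediv_of_pos (by norm_num)
    have hih := ih (a + 1) (by omega)
    rw [hfa', hfc] at hih
    rw [hfa, hfc]
    by_cases he : a % 2 = 0
    · have : (PySem.Int.mod a 2 == 0) = true := by rw [h2]; simpa using he
      simp only [this, if_true, List.length_cons]
      push_cast
      split_ifs at hih ⊢ <;> omega
    · have : (PySem.Int.mod a 2 == 0) = false := by rw [h2]; simpa using he
      simp only [this, Bool.false_eq_true, if_false]
      split_ifs at hih ⊢ <;> omega

theorem pvOddCount (c a : Int) :
    ((((PySem.List.pyRange a c 1).filter (fun x => PySem.Int.mod x 2 != 0)).length : Int))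
      = if c ≤ a then 0 else (c - a) - (PySem.Int.floordiv (c - 1) 2 - PySem.Int.floordiv (a - 1) 2) := by
  obtain ⟨n, hn⟩ : ∃ n : Nat, (c - a).toNat = n := ⟨_, rfl⟩
  induction n generalizing a with
  | zero =>
    have hca : c ≤ a := by omega
    rw [PySem.List.pyRange_one_eq_nil hca]
    simp [hca]
  | succ n ih =>
    have hac : a < c := by omega
    rw [PySem.List.pyRange_one_cons hac, List.filter_cons]
    have h2 : PySem.Int.mod a 2 = a % 2 :=
      PySem.Int.mod_eq_emod_of_pos (by norm_num)
    have hfa : PySem.Int.floordiv (a - 1) 2 = (a - 1) / 2 :=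
      PySem.Int.floordiv_eq_ediv_of_pos (by norm_num)
    have hfa' : PySem.Int.floordiv (a + 1 - 1) 2 = (a + 1 - 1) / 2 :=
      PySem.Int.floordiv_eq_ediv_of_pos (by norm_num)
    have hfc : PySem.Int.floordiv (c - 1) 2 = (c - 1) / 2 :=
      PySem.Int.floordiv_eq_ediv_of_pos (by norm_num)
    have hih := ih (a + 1) (by omega)
    rw [hfa', hfc] at hih
    rw [hfa, hfc]
    by_cases he : a % 2 = 0
    · have : (PySem.Int.mod a 2 != 0) = false := by rw [h2]; simpa using he
      simp only [this, Bool.false_eq_true, if_false]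
      split_ifs at hih ⊢ <;> omega
    · have : (PySem.Int.mod a 2 != 0) = true := by rw [h2]; simpa using he
      simp only [this, if_true, List.length_cons]
      push_cast
      split_ifs at hih ⊢ <;> omega

-- ===== VERDICT (by name: the statement is the Claim_ definition above) =====
theorem numofBlock_spec : Claim_unchanged_numofBlock := by
  unfold Claim_unchanged_numofBlock
  intro q hdom hpre
  unfold Spec_numofBlock
  intro hD
  rcases q with _ | ⟨x1, q⟩
  · exact absurd hpre (by simp [Pre_numofBlock])
  rcases q with _ | ⟨y1, q⟩
  · exact absurd hpre (by simp [Pre_numofBlock])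
  rcases q with _ | ⟨x2, q⟩
  · exact absurd hpre (by simp [Pre_numofBlock])
  rcases q with _ | ⟨y2, t⟩
  · exact absurd hpre (by simp [Pre_numofBlock])
  have g0 : (PySem.List.pyGet? (x1 :: y1 :: x2 :: y2 :: t) 0).getD 0 = x1 := by
    simp [PySem.List.pyGet?, PySem.List.pyIdx?]; rw [if_pos (by omega)]; simp
  have g1 : (PySem.List.pyGet? (x1 :: y1 :: x2 :: y2 :: t) 1).getD 0 = y1 := by
    simp [PySem.List.pyGet?, PySem.List.pyIdx?]; rw [if_pos (by omega)]; simp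
  have g2 : (PySem.List.pyGet? (x1 :: y1 :: x2 :: y2 :: t) 2).getD 0 = x2 := by
    simp [PySem.List.pyGet?, PySem.List.pyIdx?]; rw [if_pos (by omega)]; simp
  have g3 : (PySem.List.pyGet? (x1 :: y1 :: x2 :: y2 :: t) 3).getD 0 = y2 := by
    simp [PySem.List.pyGet?, PySem.List.pyIdx?]; rw [if_pos (by omega)]; simp
  have hmod2 : ∀ z : Int, PySem.Int.mod z 2 = z % 2 := fun z =>
    PySem.Int.mod_eq_emod_of_pos (by norm_num)
  have hD' : ¬ ( (2:Int) ∣ ((x2 - x1 + 1) * (y2 - y1 + 1)) ∧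
      2 ^ 53 ≤ (((x2 - x1 + 1) * (y2 - y1 + 1)) / 2).natAbs ∧
      ¬ 2 ^ (Nat.log2 ((((x2 - x1 + 1) * (y2 - y1 + 1)) / 2).natAbs) - 52) ∣
        (((x2 - x1 + 1) * (y2 - y1 + 1)) / 2).natAbs ) := by
    intro hC
    apply hD
    unfold D_numofBlock
    refine ⟨by simp, ?_, ?_, ?_⟩
    · simpa using hC.1
    · simpa using hC.2.1
    · simpa using hC.2.2
  simp only [numofBlock, numofBlock_alt, g0, g1, g2, g3]
  by_cases hb : PySem.Int.mod (x2 - x1 + 1) 2 = 0 ∨ PySem.Int.mod (y2 - y1 + 1) 2 = 0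
  · rw [if_pos hb, if_pos hb]
    have hdvd2 : (2:Int) ∣ ((x2 - x1 + 1) * (y2 - y1 + 1)) := by
      rcases hb with h | h
      · rw [hmod2] at h
        exact Dvd.dvd.mul_right (by omega) _
      · rw [hmod2] at h
        exact Dvd.dvd.mul_left (by omega) _
    have heven : ((x2 - x1 + 1) * (y2 - y1 + 1)) % 2 = 0 := Int.emod_eq_zero_of_dvd hdvd2
    have hok : (((x2 - x1 + 1) * (y2 - y1 + 1)) / 2).natAbs < 2 ^ 53 ∨
        2 ^ (Nat.log2 ((((x2 - x1 + 1) * (y2 - y1 + 1)) / 2).natAbs) - 52) ∣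
          (((x2 - x1 + 1) * (y2 - y1 + 1)) / 2).natAbs := by
      by_contra hc
      push_neg at hc
      exact hD' ⟨hdvd2, by omega, hc.2⟩
    rw [PySem.Int.floordiv_eq_ediv_of_pos (by norm_num), pvHalfFloat_eq _ heven hok]
  · rw [if_neg hb, if_neg hb]
    have e1 : (((PySem.List.pyRange x1 (x2 + 1) 1).filter (fun x => PySem.Int.mod x 2 == 0)).length : Int)
        = if x2 + 1 ≤ x1 then 0 else PySem.Int.floordiv x2 2 - PySem.Int.floordiv (x1 - 1) 2 := by
      simpa using pvEvenCount (x2 + 1) x1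
    have e2 : (((PySem.List.pyRange y1 (y2 + 1) 1).filter (fun x => PySem.Int.mod x 2 == 0)).length : Int)
        = if y2 + 1 ≤ y1 then 0 else PySem.Int.floordiv y2 2 - PySem.Int.floordiv (y1 - 1) 2 := by
      simpa using pvEvenCount (y2 + 1) y1
    have e3 : (((PySem.List.pyRange x1 (x2 + 1) 1).filter (fun x => PySem.Int.mod x 2 != 0)).length : Int)
        = if x2 + 1 ≤ x1 then 0
          else (x2 + 1 - x1) - (PySem.Int.floordiv x2 2 - PySem.Int.floordiv (x1 - 1) 2) := by
      simpa using pvOddCount (x2 + 1) x1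
    have e4 : (((PySem.List.pyRange y1 (y2 + 1) 1).filter (fun x => PySem.Int.mod x 2 != 0)).length : Int)
        = if y2 + 1 ≤ y1 then 0
          else (y2 + 1 - y1) - (PySem.Int.floordiv y2 2 - PySem.Int.floordiv (y1 - 1) 2) := by
      simpa using pvOddCount (y2 + 1) y1
    rw [e1, e2, e3, e4]
    unfold pvCounts
    simp only [apply_ite Prod.fst, apply_ite Prod.snd]
    split_ifs <;>
      simp only [List.cons.injEq, and_true] <;>
      first
        | (exfalso; omega)
        | (constructor <;> ring)

theorem numofBlock_changed : Claim_changed_numofBlock := by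
  unfold Claim_changed_numofBlock; decide

theorem numofBlock_tight : Claim_exact_numofBlock := by
  unfold Claim_exact_numofBlock
  intro q hdom hpre hD
  rcases q with _ | ⟨x1, q⟩
  · exact absurd hpre (by simp [Pre_numofBlock])
  rcases q with _ | ⟨y1, q⟩
  · exact absurd hpre (by simp [Pre_numofBlock])
  rcases q with _ | ⟨x2, q⟩
  · exact absurd hpre (by simp [Pre_numofBlock])
  rcases q with _ | ⟨y2, t⟩
  · exact absurd hpre (by simp [Pre_numofBlock])
  have g0 : (PySem.List.pyGet? (x1 :: y1 :: x2 :: y2 :: t) 0).getD 0 = x1 := by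
    simp [PySem.List.pyGet?, PySem.List.pyIdx?]; rw [if_pos (by omega)]; simp
  have g1 : (PySem.List.pyGet? (x1 :: y1 :: x2 :: y2 :: t) 1).getD 0 = y1 := by
    simp [PySem.List.pyGet?, PySem.List.pyIdx?]; rw [if_pos (by omega)]; simp
  have g2 : (PySem.List.pyGet? (x1 :: y1 :: x2 :: y2 :: t) 2).getD 0 = x2 := by
    simp [PySem.List.pyGet?, PySem.List.pyIdx?]; rw [if_pos (by omega)]; simp
  have g3 : (PySem.List.pyGet? (x1 :: y1 :: x2 :: y2 :: t) 3).getD 0 = y2 := by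
    simp [PySem.List.pyGet?, PySem.List.pyIdx?]; rw [if_pos (by omega)]; simp
  have hmod2 : ∀ z : Int, PySem.Int.mod z 2 = z % 2 := fun z =>
    PySem.Int.mod_eq_emod_of_pos (by norm_num)
  obtain ⟨hlen, hb0, hbig, hnd⟩ := hD
  simp only [List.getD_cons_zero, List.getD_cons_succ] at hb0 hbig hnd
  have hb : PySem.Int.mod (x2 - x1 + 1) 2 = 0 ∨ PySem.Int.mod (y2 - y1 + 1) 2 = 0 := by
    rcases Int.prime_two.dvd_mul.mp hb0 with h | h
    · left; rw [hmod2]; omega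
    · right; rw [hmod2]; omega
  have heven : ((x2 - x1 + 1) * (y2 - y1 + 1)) % 2 = 0 := Int.emod_eq_zero_of_dvd hb0
  simp only [numofBlock, numofBlock_alt, g0, g1, g2, g3]
  rw [if_pos hb, if_pos hb, PySem.Int.floordiv_eq_ediv_of_pos (by norm_num)]
  intro hEq
  simp only [List.cons.injEq] at hEq
  exact pvHalfFloat_ne ((x2 - x1 + 1) * (y2 - y1 + 1)) heven hbig hnd hEq.1
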